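-- pv_equiv track=rewrite | github.com/kyungeune/programmers | 프로그래머스/2/87390. n＾2 배열 자르기/n＾2 배열 자르기.py | solution
-- ===== SOURCE A (Python) =====
-- def solution(n, left, right):
--     answer = []
--
--
--     a = left // n
--     b = left % n
--     sum = 0
--     need = right - left + 1
--
--     for i in range(a, n):
--         for j in range(b, n):
--             if i+1 >= j+1:
--                 answer.append(i + 1)
--             else:
--                 answer.append(j + 1)
--
--             sum += 1
--             if sum == need:
--                 return answer
--         b = 0
--
--
--     return answer
-- ===== SOURCE B (Python) =====
-- def solution(n, left, right):
--     # walk the flat indices of the n x n grid from `left`; cell k sits at row k // n,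
--     # column k % n, so its value is max(k // n, k % n) + 1; stop after index `right`
--     values = []
--     for k in range(left, n * n):
--         values.append(max(k // n, k % n) + 1)
--         if k == right:
--             break
--     return values
-- ===== Notes on version B (the rewrite author's own statement) =====
-- stated objective: simpler
-- what changed: Replaces the stateful nested row/column walk (running counters a, b, sum, need, a row reset and an early-return sentinel) by a single flat-index loop whose cell coordinates come directly from divmod (k//n, k%n), breaking after index right; Pre_ excludes n <= 0, outside the n-by-n grid domain: n = 0 raises ZeroDivisionError in A and for n < 0 A's ranges are empty.
-- outside the precondition, e.g. on solution(-2, 0, 1): A returns [], B returns [1, 0]; on solution(0, 0, 1): A raises ZeroDivisionError, B returns []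
import Mathlib
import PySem

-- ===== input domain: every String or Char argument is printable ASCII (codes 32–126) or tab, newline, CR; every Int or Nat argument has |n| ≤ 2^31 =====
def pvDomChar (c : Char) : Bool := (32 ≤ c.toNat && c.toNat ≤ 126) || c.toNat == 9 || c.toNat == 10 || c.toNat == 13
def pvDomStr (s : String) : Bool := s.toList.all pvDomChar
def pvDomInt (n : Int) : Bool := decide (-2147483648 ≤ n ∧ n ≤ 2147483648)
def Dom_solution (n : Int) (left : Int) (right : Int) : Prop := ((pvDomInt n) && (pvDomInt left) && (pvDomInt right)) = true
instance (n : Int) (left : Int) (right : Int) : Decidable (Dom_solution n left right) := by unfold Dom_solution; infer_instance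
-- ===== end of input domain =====

-- B replaces A's stateful nested row/column walk (counters a, b, sum, need, a row reset
-- and an early-return sentinel) by a single flat-index loop taking each cell's coordinates
-- directly from divmod and breaking after index `right`.

-- ===== PORT A =====
-- inner 'for j in range(b, n)' loop as a counter recursion (Python's range is lazy, so the
-- loop counter is recursed on directly); third component true = early 'return answer' fired
def pyInnerA (n need i : Int) (answer : List Int) (sum j : Int) : List Int × Int × Bool :=
  if _h : j < n then
    let answer' := if i + 1 ≥ j + 1 then answer ++ [i + 1] else answer ++ [j + 1]
    let sum' := sum + 1
    if sum' = need then (answer', sum', true) else pyInnerA n need i answer' sum' (j + 1)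
  else (answer, sum, false)
termination_by (n - j).toNat
decreasing_by omega

-- outer 'for i in range(a, n)' loop, resetting b to 0 after each row
def pyOuterA (n need : Int) (answer : List Int) (b sum i : Int) : List Int :=
  if _h : i < n then
    let r := pyInnerA n need i answer sum b
    if r.2.2 then r.1 else pyOuterA n need r.1 0 r.2.1 (i + 1)
  else answer
termination_by (n - i).toNat
decreasing_by omega

def solution (n : Int) (left : Int) (right : Int) : List Int :=
  pyOuterA n (right - left + 1) [] (PySem.Int.mod left n) 0 (PySem.Int.floordiv left n)

-- ===== PORT B =====
-- Source B's 'for k in range(left, n*n): values.append(max(k//n, k%n)+1); if k == right: break'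
def bLoopB (n right : Int) (values : List Int) (k : Int) : List Int :=
  if _h : k < n * n then
    let values' := values ++ [max (PySem.Int.floordiv k n) (PySem.Int.mod k n) + 1]
    if k = right then values' else bLoopB n right values' (k + 1)
  else values
termination_by (n * n - k).toNat
decreasing_by omega

def solution_alt (n : Int) (left : Int) (right : Int) : List Int :=
  bLoopB n right [] left

-- ===== PRECONDITION & SPEC =====
-- Pre_ excludes only n ≤ 0, which is outside the problem's domain (n is the side of an
-- n×n grid): n = 0 raises ZeroDivisionError in A, and for n < 0 both of A's ranges are
-- empty so A returns [] while B walks flat indices up to n*n.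
def Pre_solution (n : Int) (left : Int) (right : Int) : Prop := 1 ≤ n
instance (n : Int) (left : Int) (right : Int) : Decidable (Pre_solution n left right) := by
  unfold Pre_solution; infer_instance

def pvWitness_solution : Int × Int × Int := (3, 2, 5)

def Spec_solution (n : Int) (left : Int) (right : Int) (out : List Int) : Prop :=
  out = solution_alt n left right
instance (n : Int) (left : Int) (right : Int) (out : List Int) : Decidable (Spec_solution n left right out) := by
  unfold Spec_solution; infer_instance

-- ===== CLAIM (what is proved, stated in full; the proofs are below) =====
def Claim_equal_solution : Prop := ∀ (n : Int) (left : Int) (right : Int), Dom_solution n left right → Pre_solution n left right → Spec_solution n left right (solution n left right)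

-- ===== LEMMAS AND PROOFS =====

-- the per-cell value: max(i,j)+1 written as A writes it equals B's divmod form at flat index i*n+j
lemma cell_eq (n i j : Int) (hn : 1 ≤ n) (hj0 : 0 ≤ j) (hjn : j < n) :
    (if i + 1 ≥ j + 1 then i + 1 else j + 1) =
      max (PySem.Int.floordiv (i * n + j) n) (PySem.Int.mod (i * n + j) n) + 1 := by
  have hdiv : PySem.Int.floordiv (i * n + j) n = i := by
    rw [PySem.Int.floordiv_eq_iff_of_pos (by omega)]
    constructor <;> nlinarith
  have hmod : PySem.Int.mod (i * n + j) n = j := by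
    have h := PySem.Int.floordiv_mul_add_mod (i * n + j) n
    rw [hdiv] at h; omega
  rw [hdiv, hmod, max_def]
  split_ifs <;> omega

-- one row: A's per-element values over range(b, c) are B's values over the shifted flat range
lemma row_map_eq (n i b c : Int) (hn : 1 ≤ n) (hb : 0 ≤ b) (hc : c ≤ n) :
    (PySem.List.pyRange b c 1).map (fun j => if i + 1 ≥ j + 1 then i + 1 else j + 1) =
      (PySem.List.pyRange (i * n + b) (i * n + c) 1).map
        (fun k => max (PySem.Int.floordiv k n) (PySem.Int.mod k n) + 1) := by
  rw [PySem.List.pyRange_one b c, PySem.List.pyRange_one (i * n + b)]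
  have hlen : (i * n + c - (i * n + b)) = c - b := by ring
  rw [hlen]
  simp only [List.map_map]
  apply List.map_congr_left
  intro k hk
  simp only [List.mem_range] at hk
  have hkc : (k : Int) < c - b := by
    by_cases h : b ≤ c
    · omega
    · omega
  simp only [Function.comp]
  have : i * n + b + (k : Int) = i * n + (b + k) := by ring
  rw [this, cell_eq n i (b + k) hn (by omega) (by omega)]

-- inner loop: starting at column j with r = need - sum still wanted, the loop either returns
-- early after exactly r cells (when 1 ≤ r ≤ n - j) or consumes the whole row
lemma pyInnerA_spec (n need i : Int) : ∀ (m : Nat) (j : Int), (n - j).toNat = m → j ≤ n →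
    ∀ (answer : List Int) (sum : Int),
    pyInnerA n need i answer sum j =
      if 1 ≤ need - sum ∧ need - sum ≤ n - j then
        (answer ++ (PySem.List.pyRange j (j + (need - sum)) 1).map
          (fun j' => if i + 1 ≥ j' + 1 then i + 1 else j' + 1), need, true)
      else
        (answer ++ (PySem.List.pyRange j n 1).map
          (fun j' => if i + 1 ≥ j' + 1 then i + 1 else j' + 1), sum + (n - j), false) := by
  intro m
  induction m with
  | zero =>
    intro j hm hj answer sum
    have hjn : j = n := by omega
    rw [hjn, pyInnerA, dif_neg (by omega),
      if_neg (show ¬ (1 ≤ need - sum ∧ need - sum ≤ n - n) by omega),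
      PySem.List.pyRange_one_eq_nil le_rfl]
    simp
  | succ m ih =>
    intro j hm hj answer sum
    have hjn : j < n := by omega
    rw [pyInnerA, dif_pos hjn]
    dsimp only
    by_cases hlast : sum + 1 = need
    · rw [if_pos hlast,
        if_pos (show 1 ≤ need - sum ∧ need - sum ≤ n - j by omega)]
      have h1 : j + (need - sum) = j + 1 := by omega
      rw [h1, PySem.List.pyRange_one_singleton]
      simp only [List.map_cons, List.map_nil, Prod.mk.injEq]
      split_ifs <;> simp [hlast]
    · rw [if_neg hlast, ih (j + 1) (by omega) (by omega)]
      by_cases hC : 1 ≤ need - sum ∧ need - sum ≤ n - j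
      · rw [if_pos (show 1 ≤ need - (sum + 1) ∧ need - (sum + 1) ≤ n - (j + 1) by omega),
          if_pos hC]
        have h1 : j + 1 + (need - (sum + 1)) = j + (need - sum) := by omega
        rw [h1, PySem.List.pyRange_one_cons (show j < j + (need - sum) by omega)]
        simp only [List.map_cons, Prod.mk.injEq]
        split_ifs <;> simp
      · rw [if_neg (show ¬ (1 ≤ need - (sum + 1) ∧ need - (sum + 1) ≤ n - (j + 1)) by omega),
          if_neg hC]
        rw [PySem.List.pyRange_one_cons hjn]
        simp only [List.map_cons, Prod.mk.injEq]
        refine ⟨?_, by omega, trivial⟩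
        split_ifs <;> simp

-- outer loop: starting at row a' column b, A appends B's values for the flat indices from
-- a'*n + b up to (excl.) the early-return point when it is reachable, else up to n*n
lemma pyOuterA_spec (n need : Int) (hn : 1 ≤ n) : ∀ (m : Nat) (a' : Int), (n - a').toNat = m →
    ∀ (b sum : Int) (answer : List Int), 0 ≤ b → b ≤ n →
    pyOuterA n need answer b sum a' =
      answer ++ (PySem.List.pyRange (a' * n + b)
          (if 1 ≤ need - sum ∧ need - sum ≤ (n - a') * n - b then a' * n + b + (need - sum)
           else n * n) 1).map
        (fun k => max (PySem.Int.floordiv k n) (PySem.Int.mod k n) + 1) := by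
  intro m
  induction m with
  | zero =>
    intro a' hm b sum answer hb0 hbn
    have han : n ≤ a' := by omega
    have hcells : (n - a') * n ≤ 0 := by nlinarith
    rw [pyOuterA, dif_neg (by omega),
      if_neg (show ¬ (1 ≤ need - sum ∧ need - sum ≤ (n - a') * n - b) by omega),
      PySem.List.pyRange_one_eq_nil (by nlinarith)]
    simp
  | succ m ih =>
    intro a' hm b sum answer hb0 hbn
    have han : a' < n := by omega
    have hrow : (n - (a' + 1)) * n = (n - a') * n - n := by ring
    rw [pyOuterA, dif_pos han]
    dsimp only
    rw [pyInnerA_spec n need a' (n - b).toNat b rfl hbn answer sum]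
    by_cases hC : 1 ≤ need - sum ∧ need - sum ≤ n - b
    · -- early return inside this row
      rw [if_pos hC]
      simp only [if_true]
      rw [if_pos (show 1 ≤ need - sum ∧ need - sum ≤ (n - a') * n - b from
        ⟨by omega, by nlinarith [hC.2]⟩)]
      rw [row_map_eq n a' b (b + (need - sum)) hn hb0 (by omega)]
      have h1 : a' * n + (b + (need - sum)) = a' * n + b + (need - sum) := by ring
      rw [h1]
    · -- row exhausted: recurse into the next row with b = 0
      rw [if_neg hC]
      simp only [Bool.false_eq_true, if_false]
      rw [ih (a' + 1) (by omega) 0 (sum + (n - b)) _ le_rfl (by omega)]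
      rw [row_map_eq n a' b n hn hb0 le_rfl]
      have hmid1 : a' * n + b ≤ a' * n + n := by omega
      by_cases hC2 : 1 ≤ need - sum ∧ need - sum ≤ (n - a') * n - b
      · have hbig : n - b < need - sum := by omega
        rw [if_pos (show 1 ≤ need - (sum + (n - b)) ∧
              need - (sum + (n - b)) ≤ (n - (a' + 1)) * n - 0 by
            have := hrow; omega)]
        rw [if_pos hC2]
        have h2 : (a' + 1) * n + 0 + (need - (sum + (n - b))) = a' * n + b + (need - sum) := by
          ring
        have h3 : (a' + 1) * n + 0 = a' * n + n := by ring
        rw [h2, h3, List.append_assoc, ← List.map_append,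
          ← PySem.List.pyRange_one_append (a' * n + b) (a' * n + n)
            (a' * n + b + (need - sum)) hmid1 (by omega)]
      · rw [if_neg (show ¬ (1 ≤ need - (sum + (n - b)) ∧
              need - (sum + (n - b)) ≤ (n - (a' + 1)) * n - 0) by
            have := hrow; omega)]
        rw [if_neg hC2]
        have h3 : (a' + 1) * n + 0 = a' * n + n := by ring
        have hmid2 : a' * n + n ≤ n * n := by nlinarith
        rw [h3, List.append_assoc, ← List.map_append,
          ← PySem.List.pyRange_one_append (a' * n + b) (a' * n + n) (n * n) hmid1 hmid2]

-- B's loop from index k emits the flat cells up to `right` (inclusive) when `right` lies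
-- ahead of k inside the grid, else up to the grid's end
lemma bLoopB_spec (n right : Int) : ∀ (m : Nat) (k : Int), (n * n - k).toNat = m →
    ∀ (values : List Int),
    bLoopB n right values k =
      values ++ (PySem.List.pyRange k
          (if k ≤ right ∧ right < n * n then right + 1 else n * n) 1).map
        (fun k' => max (PySem.Int.floordiv k' n) (PySem.Int.mod k' n) + 1) := by
  intro m
  induction m with
  | zero =>
    intro k hm values
    have hk : n * n ≤ k := by omega
    rw [bLoopB, dif_neg (by omega)]
    by_cases hC : k ≤ right ∧ right < n * n
    · omega
    · rw [if_neg hC, PySem.List.pyRange_one_eq_nil hk]; simp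
  | succ m ih =>
    intro k hm values
    have hk : k < n * n := by omega
    rw [bLoopB, dif_pos hk]
    dsimp only
    by_cases hbr : k = right
    · rw [if_pos hbr, if_pos (show k ≤ right ∧ right < n * n by omega)]
      rw [show right + 1 = k + 1 by omega, PySem.List.pyRange_one_singleton]
      simp
    · rw [if_neg hbr, ih (k + 1) (by omega)]
      by_cases hC : k ≤ right ∧ right < n * n
      · rw [if_pos (show k + 1 ≤ right ∧ right < n * n by omega), if_pos hC,
          PySem.List.pyRange_one_cons (show k < right + 1 by omega)]
        simp
      · rw [if_neg (show ¬ (k + 1 ≤ right ∧ right < n * n) by omega), if_neg hC,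
          PySem.List.pyRange_one_cons hk]
        simp

-- ===== VERDICT (by name: the statement is the Claim_ definition above) =====
theorem solution_spec : Claim_equal_solution := by
  intro n left right _ hn
  unfold Pre_solution at hn
  unfold Spec_solution solution solution_alt
  have hb0 : 0 ≤ PySem.Int.mod left n := PySem.Int.mod_nonneg left (by omega)
  have hbn : PySem.Int.mod left n < n := PySem.Int.mod_lt left (by omega)
  have hid : PySem.Int.floordiv left n * n + PySem.Int.mod left n = left :=
    PySem.Int.floordiv_mul_add_mod left n
  rw [pyOuterA_spec n (right - left + 1) hn (n - PySem.Int.floordiv left n).toNat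
    (PySem.Int.floordiv left n) rfl (PySem.Int.mod left n) 0 [] hb0 (by omega)]
  rw [bLoopB_spec n right (n * n - left).toNat left rfl []]
  rw [List.nil_append, List.nil_append, hid]
  have hgrid : (n - PySem.Int.floordiv left n) * n - PySem.Int.mod left n = n * n - left := by
    have h : (n - PySem.Int.floordiv left n) * n - PySem.Int.mod left n =
        n * n - (PySem.Int.floordiv left n * n + PySem.Int.mod left n) := by ring
    rw [h, hid]
  by_cases hw : left ≤ right ∧ right < n * n
  · rw [if_pos (show 1 ≤ right - left + 1 - 0 ∧ right - left + 1 - 0 ≤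
        (n - PySem.Int.floordiv left n) * n - PySem.Int.mod left n by omega),
      if_pos hw]
    have h1 : left + (right - left + 1 - 0) = right + 1 := by ring
    rw [h1]
  · rw [if_neg (show ¬ (1 ≤ right - left + 1 - 0 ∧ right - left + 1 - 0 ≤
        (n - PySem.Int.floordiv left n) * n - PySem.Int.mod left n) by omega),
      if_neg hw]
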